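-- pv_equiv track=rewrite | github.com/khangn7/cspc217 | assignments/CPSC217S23A4Starter.py | part5
-- ===== SOURCE A (Python) =====
-- def part5(my_dict:dict) -> list:
--     """
--     Return most viral people, people who have contacted most people
--     :param my_dict: dict, key sick_person : values (list) people who came in contact with key
--     :return: list of strs, names of most viral people
--     """
--     viral_names = []
--
--     counts = {}
--     highest = 0 # will never encounter comparision with 0 or lower
--     for sick_p in my_dict:
--         n = len(my_dict[sick_p])
--         if n > highest:
--             highest = n
--         counts[sick_p] = n
--
--     for sick_p in counts:
--         if counts[sick_p] == highest:
--             viral_names.append(sick_p)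
--
--     return viral_names
-- ===== SOURCE B (Python) =====
-- def part5(my_dict: dict) -> list:
--     """
--     Return most viral people, people who have contacted most people.
--     Single pass: build an inverted count -> keys index and a running maximum,
--     then finish with one lookup instead of a second filtering scan.
--     """
--     groups = {}
--     highest = 0
--     for sick_p in my_dict:
--         n = len(my_dict[sick_p])
--         groups.setdefault(n, []).append(sick_p)
--         if n > highest:
--             highest = n
--     return groups.get(highest, [])
-- ===== Notes on version B (the rewrite author's own statement) =====
-- stated objective: alternative
-- what changed: B makes a single pass that buckets each key into an inverted count->keys dict while tracking the running maximum, then returns the bucket of the maximum with one lookup, replacing A's two-pass max-then-filter scan.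
import Mathlib
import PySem

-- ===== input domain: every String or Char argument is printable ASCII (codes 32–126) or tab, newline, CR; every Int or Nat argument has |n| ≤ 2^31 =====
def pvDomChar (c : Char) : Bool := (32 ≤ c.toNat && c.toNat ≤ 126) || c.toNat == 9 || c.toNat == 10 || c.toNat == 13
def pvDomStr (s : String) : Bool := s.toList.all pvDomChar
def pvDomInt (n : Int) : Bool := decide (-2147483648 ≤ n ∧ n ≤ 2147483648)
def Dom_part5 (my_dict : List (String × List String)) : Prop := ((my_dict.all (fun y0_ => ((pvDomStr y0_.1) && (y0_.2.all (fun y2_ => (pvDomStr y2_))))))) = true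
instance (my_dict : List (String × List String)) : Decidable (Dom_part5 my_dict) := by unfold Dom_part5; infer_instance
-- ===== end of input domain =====

-- B replaces A's two-pass max-then-filter with one bucketing pass (count -> keys dict plus a
-- running maximum) finished by a single lookup; same O(n) cost, alternative decomposition.

-- ===== PORT A =====
-- first loop: highest/counts over the dict's keys; second loop: collect keys whose count is highest
def part5 (my_dict : List (String × List String)) : List String :=
  let st := my_dict.foldl
    (fun (s : Int × PySem.Dict String Int) kv =>
      (if (kv.2.length : Int) > s.1 then (kv.2.length : Int) else s.1,
       s.2.insert kv.1 (kv.2.length : Int)))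
    (0, PySem.Dict.empty)
  st.2.items.foldl (fun acc kv => if kv.2 = st.1 then acc ++ [kv.1] else acc) []

-- ===== PORT B =====
-- one loop: groups.setdefault(n, []).append(k) = modify n [] (· ++ [k]); return groups.get(highest, [])
def part5_alt (my_dict : List (String × List String)) : List String :=
  let st := my_dict.foldl
    (fun (s : PySem.Dict Int (List String) × Int) kv =>
      (s.1.modify ((kv.2.length : Int)) [] (fun xs => xs ++ [kv.1]),
       if (kv.2.length : Int) > s.2 then (kv.2.length : Int) else s.2))
    (PySem.Dict.empty, 0)
  st.1.getD st.2 []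

-- ===== PRECONDITION & SPEC =====
-- Pre_ admits exactly the association lists that represent a Python dict (distinct keys):
-- the Python A receives a dict, so a duplicate-key list corresponds to no input of A.
def Pre_part5 (my_dict : List (String × List String)) : Prop :=
  (my_dict.map Prod.fst).Nodup
instance (my_dict : List (String × List String)) : Decidable (Pre_part5 my_dict) := by
  unfold Pre_part5; infer_instance

def pvWitness_part5 : (List (String × List String)) := [("a", ["x", "y"]), ("b", ["y"])]

def Spec_part5 (my_dict : List (String × List String)) (out : List String) : Prop := out = part5_alt my_dict
instance (my_dict : List (String × List String)) (out : List String) : Decidable (Spec_part5 my_dict out) := by unfold Spec_part5; infer_instance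

-- ===== CLAIM (what is proved, stated in full; the proofs are below) =====
def Claim_equal_part5 : Prop := ∀ (my_dict : List (String × List String)), Dom_part5 my_dict → Pre_part5 my_dict → Spec_part5 my_dict (part5 my_dict)

-- ===== LEMMAS AND PROOFS =====

-- the running maximum both loops maintain
def pvMaxLen (l : List (String × List String)) : Int :=
  l.foldl (fun h kv => if (kv.2.length : Int) > h then (kv.2.length : Int) else h) 0

-- A's counts dict over distinct keys: items are the input pairs with lengths, keys are the input keys
theorem counts_items (l : List (String × List String)) (h : (l.map Prod.fst).Nodup) :
    (l.foldl (fun (d : PySem.Dict String Int) kv => d.insert kv.1 (kv.2.length : Int))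
        PySem.Dict.empty).items
      = l.map (fun kv => (kv.1, (kv.2.length : Int)))
    ∧ (l.foldl (fun (d : PySem.Dict String Int) kv => d.insert kv.1 (kv.2.length : Int))
        PySem.Dict.empty).keys
      = l.map Prod.fst := by
  induction l using List.reverseRecOn with
  | nil => constructor <;> rfl
  | append_singleton l x ih =>
    simp only [List.map_append, List.map_cons, List.map_nil, List.nodup_append] at h
    have h' : (l.map Prod.fst).Nodup := h.1
    have hx : x.1 ∉ l.map Prod.fst := by
      intro hmem
      rcases List.mem_map.mp hmem with ⟨p, hp, hpe⟩
      exact h.2.2 p.1 (List.mem_map_of_mem hp) x.1 (List.mem_singleton_self _) hpe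
    obtain ⟨hitems, hkeys⟩ := ih h'
    have hnc : ¬ (l.foldl (fun (d : PySem.Dict String Int) kv => d.insert kv.1 (kv.2.length : Int))
        PySem.Dict.empty).contains x.1 = true := by
      rw [PySem.Dict.contains_iff_mem_keys, hkeys]
      simpa using hx
    constructor
    · rw [List.foldl_append]
      simp only [List.foldl_cons, List.foldl_nil]
      rw [PySem.Dict.items_insert_of_not_contains _ _ (by simpa using hnc), hitems]
      simp
    · rw [List.foldl_append]
      simp only [List.foldl_cons, List.foldl_nil]
      rw [PySem.Dict.keys_insert_of_not_contains _ _ (by simpa using hnc), hkeys]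
      simp

-- B's groups dict: each bucket n holds, in order, the keys whose list has length n
theorem groups_getD (l : List (String × List String)) (n : Int) :
    (l.foldl (fun (d : PySem.Dict Int (List String)) kv =>
        d.modify ((kv.2.length : Int)) [] (fun xs => xs ++ [kv.1])) PySem.Dict.empty).getD n []
      = (l.filter (fun kv => (kv.2.length : Int) = n)).map Prod.fst := by
  induction l using List.reverseRecOn generalizing n with
  | nil => rfl
  | append_singleton l x ih =>
    rw [List.foldl_append]
    simp only [List.foldl_cons, List.foldl_nil]
    rw [PySem.Dict.getD_modify]
    by_cases hn : n = (x.2.length : Int)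
    · simp [hn, ih, List.filter_append]
    · simp [hn, ih, List.filter_append, Ne.symm hn]

theorem part5_alt_eq (l : List (String × List String)) :
    part5_alt l = (l.filter (fun kv => (kv.2.length : Int) = pvMaxLen l)).map Prod.fst := by
  unfold part5_alt
  have hsp := PySem.List.foldl_prod_mk
    (fun (d : PySem.Dict Int (List String)) (kv : String × List String) =>
      d.modify ((kv.2.length : Int)) [] (fun xs => xs ++ [kv.1]))
    (fun (h : Int) (kv : String × List String) =>
      if (kv.2.length : Int) > h then (kv.2.length : Int) else h)
    l PySem.Dict.empty 0
  simp only [hsp]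
  exact groups_getD l (pvMaxLen l)

theorem part5_eq (l : List (String × List String)) (h : (l.map Prod.fst).Nodup) :
    part5 l = (l.filter (fun kv => (kv.2.length : Int) = pvMaxLen l)).map Prod.fst := by
  unfold part5
  have hsp := PySem.List.foldl_prod_mk
    (fun (h : Int) (kv : String × List String) =>
      if (kv.2.length : Int) > h then (kv.2.length : Int) else h)
    (fun (d : PySem.Dict String Int) (kv : String × List String) =>
      d.insert kv.1 (kv.2.length : Int))
    l 0 PySem.Dict.empty
  simp only [hsp]
  rw [(counts_items l h).1]
  rw [show (List.foldl (fun h kv => if ((kv.2.length : Int) > h) then (kv.2.length : Int) else h) 0 l)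
      = pvMaxLen l from rfl]
  have hfun : (fun (acc : List String) (kv : String × Int) =>
        if kv.2 = pvMaxLen l then acc ++ [kv.1] else acc)
      = (fun acc kv => if (fun kv : String × Int => decide (kv.2 = pvMaxLen l)) kv
          then acc ++ [kv.1] else acc) := by
    funext acc kv
    by_cases hkv : kv.2 = pvMaxLen l <;> simp [hkv]
  rw [hfun, PySem.List.foldl_append_if]
  simp [List.filter_map, Function.comp_def]

-- ===== VERDICT (by name: the statement is the Claim_ definition above) =====
theorem part5_spec : Claim_equal_part5 := by
  intro my_dict _ hpre
  unfold Spec_part5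
  rw [part5_eq my_dict hpre, part5_alt_eq]
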